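-- pv_equiv track=rewrite | github.com/ottomattas/llmlog | experiments/paper/common.py | parse_answer_last_token
-- ===== SOURCE A (Python) =====
-- _PUNCT = ["\n", "\r", ",", ".", ":", ";", "!", "?", "(", ")", "[", "]", "{", "}", "'", '"', "`", "*", "_"]
--
-- def _tokenize(text: str) -> list[str]:
--     t = (text or "").strip().lower()
--     for ch in _PUNCT:
--         t = t.replace(ch, " ")
--     parts = [p for p in t.split(" ") if p]
--     return parts
--
-- def parse_answer_last_token(text: str, family: str) -> int:
--     """
--     Parse answers robustly by looking for the last decisive token near the end.
--
--     Returns: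
--       0 => YES / CONTRADICTION
--       1 => NO / SATISFIABLE / UNKNOWN
--       2 => unclear
--
--     family:
--       - 'yes_no': only accept yes/no tokens
--       - 'contradiction': only accept contradiction/satisfiable/unknown tokens
--     """
--     if not text:
--         return 2
--     parts = _tokenize(text)
--     if not parts:
--         return 2
--
--     tail = parts[-15:]
--     yes_tokens = {"yes"}
--     no_tokens = {"no"}
--     contradiction_tokens = {"contradiction", "contradictory", "unsatisfiable", "inconsistent"}
--     sat_tokens = {"satisfiable", "satisfied", "unknown", "uncertain"}
--
--     for p in reversed(tail):
--         if family == "yes_no":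
--             if p in yes_tokens:
--                 return 0
--             if p in no_tokens:
--                 return 1
--         elif family == "contradiction":
--             if p in contradiction_tokens:
--                 return 0
--             if p in sat_tokens:
--                 return 1
--         else:
--             # unknown family: accept either
--             if p in yes_tokens:
--                 return 0
--             if p in no_tokens:
--                 return 1
--             if p in contradiction_tokens:
--                 return 0
--             if p in sat_tokens:
--                 return 1
--     return 2
-- ===== SOURCE B (Python) =====
-- _PUNCT = ["\n", "\r", ",", ".", ":", ";", "!", "?", "(", ")", "[", "]", "{", "}", "'", '"', "`", "*", "_"]
--
-- def _tokenize(text: str) -> list[str]: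
--     t = (text or "").strip().lower()
--     for ch in _PUNCT:
--         t = t.replace(ch, " ")
--     parts = [p for p in t.split(" ") if p]
--     return parts
--
-- def parse_answer_last_token(text: str, family: str) -> int:
--     # Build one token->code table for the requested family, then sweep the
--     # last-15-token tail FORWARD, overwriting the result on every hit.
--     if not text:
--         return 2
--     parts = _tokenize(text)
--     if not parts:
--         return 2
--
--     yes_no_table = {"yes": 0, "no": 1}
--     contradiction_table = {
--         "contradiction": 0, "contradictory": 0, "unsatisfiable": 0, "inconsistent": 0,
--         "satisfiable": 1, "satisfied": 1, "unknown": 1, "uncertain": 1,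
--     }
--     if family == "yes_no":
--         table = yes_no_table
--     elif family == "contradiction":
--         table = contradiction_table
--     else:
--         table = {**yes_no_table, **contradiction_table}
--
--     result = 2
--     for p in parts[-15:]:
--         result = table.get(p, result)
--     return result
-- ===== Notes on version B (the rewrite author's own statement) =====
-- stated objective: alternative
-- what changed: Replaces the reverse early-return scan with per-family if-chains over four keyword sets by a single precomputed token-to-code dictionary and one forward fold over the tail that overwrites the result on every hit (valid because the keyword sets are disjoint).
import Mathlib
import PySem

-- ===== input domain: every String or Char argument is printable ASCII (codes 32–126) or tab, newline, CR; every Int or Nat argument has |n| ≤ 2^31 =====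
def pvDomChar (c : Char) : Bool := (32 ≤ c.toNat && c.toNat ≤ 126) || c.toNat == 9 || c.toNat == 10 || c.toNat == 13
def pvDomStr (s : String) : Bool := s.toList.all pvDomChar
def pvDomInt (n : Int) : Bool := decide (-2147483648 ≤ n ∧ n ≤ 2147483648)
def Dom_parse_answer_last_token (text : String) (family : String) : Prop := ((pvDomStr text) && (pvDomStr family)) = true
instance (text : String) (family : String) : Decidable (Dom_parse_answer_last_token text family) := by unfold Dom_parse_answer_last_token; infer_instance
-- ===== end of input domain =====

-- B replaces A's reverse early-return scan (per-family if-chains over keyword sets) by one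
-- precomputed token-to-code table and a forward overwriting fold over the tail (alternative decomposition).


-- ===== PORT A =====
def pvPunct : List String :=
  ["\n", "\r", ",", ".", ":", ";", "!", "?", "(", ")", "[", "]", "{", "}", "'", "\"", "`", "*", "_"]

-- _tokenize (shared helper of both Pythons, identical code in Source A and Source B)
def pvTokenize (text : String) : List String :=
  let t := PySem.Str.lower (PySem.Str.strip text)
  let t := pvPunct.foldl (fun t ch => PySem.Str.replace t ch " ") t
  -- t.split(" "): sep is the nonempty literal " ", so split? is always `some` here
  ((PySem.Str.split? t " ").getD []).filter (fun p => p != "")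

def pvYesTokens : PySem.Set String := PySem.Set.ofList ["yes"]
def pvNoTokens : PySem.Set String := PySem.Set.ofList ["no"]
def pvContradictionTokens : PySem.Set String :=
  PySem.Set.ofList ["contradiction", "contradictory", "unsatisfiable", "inconsistent"]
def pvSatTokens : PySem.Set String :=
  PySem.Set.ofList ["satisfiable", "satisfied", "unknown", "uncertain"]

-- A's loop: 'for p in reversed(tail)' with early returns, as structural recursion
def pvALoop (family : String) : List String → Int
  | [] => 2
  | p :: rest =>
    if family == "yes_no" then
      if pvYesTokens.contains p then 0
      else if pvNoTokens.contains p then 1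
      else pvALoop family rest
    else if family == "contradiction" then
      if pvContradictionTokens.contains p then 0
      else if pvSatTokens.contains p then 1
      else pvALoop family rest
    else
      if pvYesTokens.contains p then 0
      else if pvNoTokens.contains p then 1
      else if pvContradictionTokens.contains p then 0
      else if pvSatTokens.contains p then 1
      else pvALoop family rest

def parse_answer_last_token (text : String) (family : String) : Int :=
  if text == "" then 2
  else
    let parts := pvTokenize text
    if parts == [] then 2
    else
      let tail := PySem.List.slice parts (some (-15)) none
      pvALoop family tail.reverse

-- ===== PORT B =====
def pvYesNoTable : PySem.Dict String Int :=
  PySem.Dict.ofList [("yes", 0), ("no", 1)]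
def pvContradictionTable : PySem.Dict String Int :=
  PySem.Dict.ofList [("contradiction", 0), ("contradictory", 0), ("unsatisfiable", 0), ("inconsistent", 0),
                     ("satisfiable", 1), ("satisfied", 1), ("unknown", 1), ("uncertain", 1)]

def pvTable (family : String) : PySem.Dict String Int :=
  if family == "yes_no" then pvYesNoTable
  else if family == "contradiction" then pvContradictionTable
  else PySem.Dict.update pvYesNoTable pvContradictionTable.items   -- {**yes_no_table, **contradiction_table}

def parse_answer_last_token_alt (text : String) (family : String) : Int :=
  if text == "" then 2
  else
    let parts := pvTokenize text
    if parts == [] then 2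
    else
      (PySem.List.slice parts (some (-15)) none).foldl
        (fun r p => PySem.Dict.getD (pvTable family) p r) 2

-- ===== PRECONDITION & SPEC =====
def Spec_parse_answer_last_token (text : String) (family : String) (out : Int) : Prop := out = parse_answer_last_token_alt text family
instance (text : String) (family : String) (out : Int) : Decidable (Spec_parse_answer_last_token text family out) := by unfold Spec_parse_answer_last_token; infer_instance

-- ===== CLAIM (what is proved, stated in full; the proofs are below) =====
def Claim_equal_parse_answer_last_token : Prop := ∀ (text : String) (family : String), Dom_parse_answer_last_token text family → Spec_parse_answer_last_token text family (parse_answer_last_token text family)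

-- ===== LEMMAS AND PROOFS =====

-- one table lookup with default r equals A's yes/no if-chain with else-value r
lemma pvStep_yesno (p : String) (r : Int) :
    PySem.Dict.getD pvYesNoTable p r =
      (if pvYesTokens.contains p then 0 else if pvNoTokens.contains p then 1 else r) := by
  rw [show pvYesNoTable = PySem.Dict.mk [("yes",0),("no",1)] from rfl]
  by_cases h1 : p = "yes"
  · subst h1; simp [pvYesTokens, PySem.Dict.getD, PySem.Dict.get?, PySem.Set.contains]
  by_cases h2 : p = "no"
  · subst h2; simp [pvYesTokens, pvNoTokens, PySem.Dict.getD, PySem.Dict.get?, PySem.Set.contains]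
  simp [pvYesTokens, pvNoTokens, PySem.Dict.getD, PySem.Dict.get?, PySem.Set.contains,
        h1, h2, Ne.symm h1, Ne.symm h2]

-- same for the contradiction-family table
lemma pvStep_contr (p : String) (r : Int) :
    PySem.Dict.getD pvContradictionTable p r =
      (if pvContradictionTokens.contains p then 0 else if pvSatTokens.contains p then 1 else r) := by
  rw [show pvContradictionTable = PySem.Dict.mk
    [("contradiction",0),("contradictory",0),("unsatisfiable",0),("inconsistent",0),
     ("satisfiable",1),("satisfied",1),("unknown",1),("uncertain",1)] from rfl]
  by_cases h3 : p = "contradiction"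
  · subst h3; simp [pvContradictionTokens, PySem.Dict.getD, PySem.Dict.get?, PySem.Set.contains]
  by_cases h4 : p = "contradictory"
  · subst h4; simp [pvContradictionTokens, PySem.Dict.getD, PySem.Dict.get?, PySem.Set.contains]
  by_cases h5 : p = "unsatisfiable"
  · subst h5; simp [pvContradictionTokens, PySem.Dict.getD, PySem.Dict.get?, PySem.Set.contains]
  by_cases h6 : p = "inconsistent"
  · subst h6; simp [pvContradictionTokens, PySem.Dict.getD, PySem.Dict.get?, PySem.Set.contains]
  by_cases h7 : p = "satisfiable"
  · subst h7; simp [pvContradictionTokens, pvSatTokens, PySem.Dict.getD, PySem.Dict.get?, PySem.Set.contains]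
  by_cases h8 : p = "satisfied"
  · subst h8; simp [pvContradictionTokens, pvSatTokens, PySem.Dict.getD, PySem.Dict.get?, PySem.Set.contains]
  by_cases h9 : p = "unknown"
  · subst h9; simp [pvContradictionTokens, pvSatTokens, PySem.Dict.getD, PySem.Dict.get?, PySem.Set.contains]
  by_cases h10 : p = "uncertain"
  · subst h10; simp [pvContradictionTokens, pvSatTokens, PySem.Dict.getD, PySem.Dict.get?, PySem.Set.contains]
  simp [pvContradictionTokens, pvSatTokens, PySem.Dict.getD, PySem.Dict.get?, PySem.Set.contains,
        h3, h4, h5, h6, h7, h8, h9, h10,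
        Ne.symm h3, Ne.symm h4, Ne.symm h5, Ne.symm h6, Ne.symm h7, Ne.symm h8, Ne.symm h9, Ne.symm h10]

-- same for the merged (unknown-family) table
lemma pvStep_merged (p : String) (r : Int) :
    PySem.Dict.getD (pvYesNoTable.update pvContradictionTable.items) p r =
      (if pvYesTokens.contains p then 0
       else if pvNoTokens.contains p then 1
       else if pvContradictionTokens.contains p then 0
       else if pvSatTokens.contains p then 1
       else r) := by
  rw [show pvYesNoTable.update pvContradictionTable.items = PySem.Dict.mk
    [("yes",0),("no",1),("contradiction",0),("contradictory",0),("unsatisfiable",0),("inconsistent",0),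
     ("satisfiable",1),("satisfied",1),("unknown",1),("uncertain",1)] from rfl]
  by_cases h1 : p = "yes"
  · subst h1; simp [pvYesTokens, PySem.Dict.getD, PySem.Dict.get?, PySem.Set.contains]
  by_cases h2 : p = "no"
  · subst h2; simp [pvYesTokens, pvNoTokens, PySem.Dict.getD, PySem.Dict.get?, PySem.Set.contains]
  by_cases h3 : p = "contradiction"
  · subst h3; simp [pvYesTokens, pvNoTokens, pvContradictionTokens, PySem.Dict.getD, PySem.Dict.get?, PySem.Set.contains]
  by_cases h4 : p = "contradictory"
  · subst h4; simp [pvYesTokens, pvNoTokens, pvContradictionTokens, PySem.Dict.getD, PySem.Dict.get?, PySem.Set.contains]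
  by_cases h5 : p = "unsatisfiable"
  · subst h5; simp [pvYesTokens, pvNoTokens, pvContradictionTokens, PySem.Dict.getD, PySem.Dict.get?, PySem.Set.contains]
  by_cases h6 : p = "inconsistent"
  · subst h6; simp [pvYesTokens, pvNoTokens, pvContradictionTokens, PySem.Dict.getD, PySem.Dict.get?, PySem.Set.contains]
  by_cases h7 : p = "satisfiable"
  · subst h7; simp [pvYesTokens, pvNoTokens, pvContradictionTokens, pvSatTokens, PySem.Dict.getD, PySem.Dict.get?, PySem.Set.contains]
  by_cases h8 : p = "satisfied"
  · subst h8; simp [pvYesTokens, pvNoTokens, pvContradictionTokens, pvSatTokens, PySem.Dict.getD, PySem.Dict.get?, PySem.Set.contains]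
  by_cases h9 : p = "unknown"
  · subst h9; simp [pvYesTokens, pvNoTokens, pvContradictionTokens, pvSatTokens, PySem.Dict.getD, PySem.Dict.get?, PySem.Set.contains]
  by_cases h10 : p = "uncertain"
  · subst h10; simp [pvYesTokens, pvNoTokens, pvContradictionTokens, pvSatTokens, PySem.Dict.getD, PySem.Dict.get?, PySem.Set.contains]
  simp [pvYesTokens, pvNoTokens, pvContradictionTokens, pvSatTokens, PySem.Dict.getD, PySem.Dict.get?, PySem.Set.contains,
        h1, h2, h3, h4, h5, h6, h7, h8, h9, h10,
        Ne.symm h1, Ne.symm h2, Ne.symm h3, Ne.symm h4, Ne.symm h5, Ne.symm h6, Ne.symm h7, Ne.symm h8, Ne.symm h9, Ne.symm h10]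

-- one fold step of B equals one branch dispatch of A's chain (else-branch glued with r)
lemma pvStep_eq (family p : String) (r : Int) :
    PySem.Dict.getD (pvTable family) p r =
      (if family == "yes_no" then
        if pvYesTokens.contains p then 0
        else if pvNoTokens.contains p then 1
        else r
      else if family == "contradiction" then
        if pvContradictionTokens.contains p then 0
        else if pvSatTokens.contains p then 1
        else r
      else
        if pvYesTokens.contains p then 0
        else if pvNoTokens.contains p then 1
        else if pvContradictionTokens.contains p then 0
        else if pvSatTokens.contains p then 1
        else r) := by
  unfold pvTable
  by_cases hf1 : (family == "yes_no") = true
  · rw [if_pos hf1, if_pos hf1]; exact pvStep_yesno p r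
  rw [if_neg hf1, if_neg hf1]
  by_cases hf2 : (family == "contradiction") = true
  · rw [if_pos hf2, if_pos hf2]; exact pvStep_contr p r
  rw [if_neg hf2, if_neg hf2]
  exact pvStep_merged p r

-- B's forward overwriting fold computes A's reverse first-match scan
lemma pvFold_eq_loop (family : String) (l : List String) :
    l.foldl (fun r p => PySem.Dict.getD (pvTable family) p r) 2 =
      pvALoop family l.reverse := by
  induction l using List.reverseRecOn with
  | nil => rfl
  | append_singleton xs x ih =>
    rw [List.foldl_append, List.foldl_cons, List.foldl_nil, List.reverse_append]
    simp only [List.reverse_singleton, List.singleton_append, pvALoop]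
    rw [pvStep_eq, ih]

-- ===== VERDICT (by name: the statement is the Claim_ definition above) =====
theorem parse_answer_last_token_spec : Claim_equal_parse_answer_last_token := by
  intro text family _
  unfold Spec_parse_answer_last_token parse_answer_last_token parse_answer_last_token_alt
  by_cases h0 : (text == "") = true <;> by_cases h1 : (pvTokenize text == []) = true <;>
    simp only [h0, h1, if_true, if_false, Bool.false_eq_true]
  all_goals exact (pvFold_eq_loop family _).symm
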